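-- pv_equiv track=rewrite | github.com/kenchapmanpdx-png/dealershipiq- | scripts/seed-vehicle-data.py | extract_base_model
-- ===== SOURCE A (Python) =====
-- BASE_MODELS = {
--     "Honda": {"Accord", "Civic", "CR-V", "HR-V", "Odyssey", "Passport", "Pilot", "Ridgeline", "Prologue", "Prelude"},
--     "Toyota": {"Camry", "Corolla", "RAV4", "Highlander", "Tacoma", "Tundra", "4Runner", "Sequoia", "Sienna", "GR86", "GR Corolla", "Supra", "Prius", "bZ4X", "Crown", "Grand Highlander", "Venza", "Land Cruiser"},
--     "Hyundai": {"Elantra", "Sonata", "Tucson", "Santa Fe", "Kona", "Palisade", "Ioniq 5", "Ioniq 6", "Ioniq 9", "Venue", "Santa Cruz", "Nexo"},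
--     "Kia": {"Forte", "K5", "Sportage", "Telluride", "Soul", "Seltos", "Sorento", "Carnival", "EV6", "EV9", "Stinger", "Niro"},
-- }
--
-- def extract_base_model(fueleconomy_model, make):
--     """Extract base model name from fueleconomy.gov model string."""
--     if make not in BASE_MODELS:
--         return fueleconomy_model, "Base"
--
--     models = BASE_MODELS[make]
--     # Sort by length descending to match longest first (e.g., "Ioniq 5" before "Ioniq")
--     for model in sorted(models, key=len, reverse=True):
--         if fueleconomy_model.startswith(model):
--             trim = fueleconomy_model[len(model):].strip()
--             return model, trim if trim else "Base"
--
--     return fueleconomy_model, "Base"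
-- ===== SOURCE B (Python) =====
-- BASE_MODELS = {
--     "Honda": {"Accord", "Civic", "CR-V", "HR-V", "Odyssey", "Passport", "Pilot", "Ridgeline", "Prologue", "Prelude"},
--     "Toyota": {"Camry", "Corolla", "RAV4", "Highlander", "Tacoma", "Tundra", "4Runner", "Sequoia", "Sienna", "GR86", "GR Corolla", "Supra", "Prius", "bZ4X", "Crown", "Grand Highlander", "Venza", "Land Cruiser"},
--     "Hyundai": {"Elantra", "Sonata", "Tucson", "Santa Fe", "Kona", "Palisade", "Ioniq 5", "Ioniq 6", "Ioniq 9", "Venue", "Santa Cruz", "Nexo"},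
--     "Kia": {"Forte", "K5", "Sportage", "Telluride", "Soul", "Seltos", "Sorento", "Carnival", "EV6", "EV9", "Stinger", "Niro"},
-- }
--
-- def extract_base_model(fueleconomy_model, make):
--     """Extract base model name from fueleconomy.gov model string."""
--     if make not in BASE_MODELS:
--         return fueleconomy_model, "Base"
--
--     # One linear scan keeping the longest matching prefix; no sort needed.
--     best, best_len = None, -1
--     for model in BASE_MODELS[make]:
--         if fueleconomy_model.startswith(model) and len(model) > best_len:
--             best, best_len = model, len(model)
--
--     if best is None:
--         return fueleconomy_model, "Base"
--     trim = fueleconomy_model[best_len:].strip()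
--     return best, trim if trim else "Base"
-- ===== Notes on version B (the rewrite author's own statement) =====
-- stated objective: simpler
-- what changed: Replaces sort-by-length-then-first-match with a single linear scan keeping the longest matching prefix in a running best variable; safe because two distinct equal-length strings cannot both prefix the same input.
import Mathlib
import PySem

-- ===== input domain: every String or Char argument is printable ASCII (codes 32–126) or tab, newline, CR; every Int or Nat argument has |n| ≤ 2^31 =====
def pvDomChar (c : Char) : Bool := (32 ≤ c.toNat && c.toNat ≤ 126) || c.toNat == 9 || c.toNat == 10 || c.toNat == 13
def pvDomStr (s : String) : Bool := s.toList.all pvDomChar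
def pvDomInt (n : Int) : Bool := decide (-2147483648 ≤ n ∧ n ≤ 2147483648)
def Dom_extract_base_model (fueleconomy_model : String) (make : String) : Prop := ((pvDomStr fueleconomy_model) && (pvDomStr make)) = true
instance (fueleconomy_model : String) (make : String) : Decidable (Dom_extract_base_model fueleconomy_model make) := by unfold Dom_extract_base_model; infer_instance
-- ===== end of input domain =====

-- B replaces A's sort-by-length-then-first-match with one linear scan keeping the longest
-- matching prefix (objective: simpler — no sort; two equal-length prefixes of one string coincide).

-- ===== PORT A =====
-- BASE_MODELS: the module-level dict of sets (each set as a PySem.Set: its distinct elements).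
def baseModels : PySem.Dict String (List String) :=
  PySem.Dict.ofList
  [("Honda", ["Accord", "Civic", "CR-V", "HR-V", "Odyssey", "Passport", "Pilot", "Ridgeline", "Prologue", "Prelude"]),
   ("Toyota", ["Camry", "Corolla", "RAV4", "Highlander", "Tacoma", "Tundra", "4Runner", "Sequoia", "Sienna", "GR86", "GR Corolla", "Supra", "Prius", "bZ4X", "Crown", "Grand Highlander", "Venza", "Land Cruiser"]),
   ("Hyundai", ["Elantra", "Sonata", "Tucson", "Santa Fe", "Kona", "Palisade", "Ioniq 5", "Ioniq 6", "Ioniq 9", "Venue", "Santa Cruz", "Nexo"]),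
   ("Kia", ["Forte", "K5", "Sportage", "Telluride", "Soul", "Seltos", "Sorento", "Carnival", "EV6", "EV9", "Stinger", "Niro"])]

-- the 'for model in sorted(models, key=len, reverse=True): if … return' loop of A
def scanA (m : String) : List String → String × String
  | [] => (m, "Base")
  | model :: rest =>
    if PySem.Str.startswith m model then
      let trim := PySem.Str.strip (PySem.Str.slice m (some (PySem.Str.len model)) none)
      (model, if trim = "" then "Base" else trim)
    else scanA m rest

def extract_base_model (fueleconomy_model : String) (make : String) : String × String :=
  match PySem.Dict.get? baseModels make with
  | none => (fueleconomy_model, "Base")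
  | some models =>
    scanA fueleconomy_model (PySem.List.sorted models (fun s => PySem.Str.len s) true)

-- ===== PORT B =====
-- one iteration of B's 'best, best_len' accumulator loop
def stepB (m : String) (st : Option String × Int) (model : String) : Option String × Int :=
  if PySem.Str.startswith m model && decide (st.2 < PySem.Str.len model) then
    (some model, PySem.Str.len model)
  else st

def extract_base_model_alt (fueleconomy_model : String) (make : String) : String × String :=
  match PySem.Dict.get? baseModels make with
  | none => (fueleconomy_model, "Base")
  | some models =>
    let st := models.foldl (stepB fueleconomy_model) (none, -1)
    match st.1 with
    | none => (fueleconomy_model, "Base")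
    | some best =>
      let trim := PySem.Str.strip (PySem.Str.slice fueleconomy_model (some st.2) none)
      (best, if trim = "" then "Base" else trim)

-- ===== PRECONDITION & SPEC =====
def Spec_extract_base_model (fueleconomy_model : String) (make : String) (out : String × String) : Prop := out = extract_base_model_alt fueleconomy_model make
instance (fueleconomy_model : String) (make : String) (out : String × String) : Decidable (Spec_extract_base_model fueleconomy_model make out) := by unfold Spec_extract_base_model; infer_instance

-- ===== CLAIM (what is proved, stated in full; the proofs are below) =====
def Claim_equal_extract_base_model : Prop := ∀ (fueleconomy_model : String) (make : String), Dom_extract_base_model fueleconomy_model make → Spec_extract_base_model fueleconomy_model make (extract_base_model fueleconomy_model make)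

-- ===== LEMMAS AND PROOFS =====

-- two equal-length prefixes of the same string are equal
theorem prefix_unique {m p q : String}
    (h1 : PySem.Str.startswith m p = true) (h2 : PySem.Str.startswith m q = true)
    (h : PySem.Str.len p = PySem.Str.len q) : p = q := by
  rw [PySem.Str.startswith_eq, PySem.Chars.startswith_iff] at h1 h2
  rw [PySem.Str.len_eq, PySem.Str.len_eq] at h
  have hlen : p.toList.length = q.toList.length := by exact_mod_cast h
  exact String.toList_inj.mp
    (List.IsPrefix.eq_of_length (List.prefix_of_prefix_length_le h1 h2 hlen.le) hlen)

-- A's scan on a list with no matching element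
theorem scanA_no_match (m : String) (L : List String)
    (h : ∀ p ∈ L, PySem.Str.startswith m p = false) : scanA m L = (m, "Base") := by
  induction L with
  | nil => rfl
  | cons x xs ih =>
    have hx : PySem.Chars.startswith m.toList x.toList = false := by
      rw [← PySem.Str.startswith_eq]; exact h x (by simp)
    simp only [scanA, PySem.Str.startswith_eq, hx, Bool.false_eq_true, if_false]
    exact ih (fun p hp => h p (by simp [hp]))

-- A's scan on a length-descending list returns the first match, which is length-maximal
theorem scanA_first_match (m : String) (L : List String)
    (hp : L.Pairwise (fun a b => PySem.Str.len b ≤ PySem.Str.len a))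
    (p : String) (hpm : p ∈ L) (hm : PySem.Str.startswith m p = true) :
    ∃ q, q ∈ L ∧ PySem.Str.startswith m q = true ∧
      (∀ r ∈ L, PySem.Str.startswith m r = true → PySem.Str.len r ≤ PySem.Str.len q) ∧
      scanA m L = (q, if PySem.Str.strip (PySem.Str.slice m (some (PySem.Str.len q)) none) = ""
                      then "Base"
                      else PySem.Str.strip (PySem.Str.slice m (some (PySem.Str.len q)) none)) := by
  induction L with
  | nil => cases hpm
  | cons x xs ih =>
    rcases List.pairwise_cons.mp hp with ⟨hx, hxs⟩
    by_cases hxm : PySem.Str.startswith m x = true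
    · have hx' : PySem.Chars.startswith m.toList x.toList = true := by
        rw [← PySem.Str.startswith_eq]; exact hxm
      refine ⟨x, by simp, hxm, ?_, ?_⟩
      · intro r hr _
        rcases List.mem_cons.mp hr with h | h
        · exact le_of_eq (by rw [h])
        · exact hx r h
      · simp only [scanA, PySem.Str.startswith_eq, hx', if_true]
    · have hx' : PySem.Chars.startswith m.toList x.toList = false := by
        rw [← PySem.Str.startswith_eq]; exact Bool.eq_false_iff.mpr hxm
      have hpx : p ∈ xs := by
        rcases List.mem_cons.mp hpm with h | h
        · exact absurd (h ▸ hm) hxm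
        · exact h
      rcases ih hxs hpx with ⟨q, hq1, hq2, hq3, hq4⟩
      refine ⟨q, by simp [hq1], hq2, ?_, ?_⟩
      · intro r hr hrm
        rcases List.mem_cons.mp hr with h | h
        · exact absurd (h ▸ hrm) hxm
        · exact hq3 r h hrm
      · simp only [scanA, PySem.Str.startswith_eq, hx', Bool.false_eq_true, if_false]
        exact hq4

-- the length component of B's accumulator never decreases
theorem foldB_mono (m : String) (L : List String) : ∀ (st : Option String × Int),
    st.2 ≤ (L.foldl (stepB m) st).2 := by
  induction L with
  | nil => intro st; exact le_refl _
  | cons x xs ih =>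
    intro st
    refine le_trans ?_ (ih (stepB m st x))
    unfold stepB
    split_ifs with h
    · have := of_decide_eq_true (Bool.and_elim_right h)
      exact le_of_lt this
    · exact le_refl _

-- B's fold either leaves the accumulator unchanged (nothing beats it) or
-- ends on a matching element of maximal length
theorem foldB_spec (m : String) (L : List String) : ∀ (st : Option String × Int),
    (L.foldl (stepB m) st = st ∧
      ∀ p ∈ L, PySem.Str.startswith m p = true → PySem.Str.len p ≤ st.2) ∨
    (∃ b, (L.foldl (stepB m) st) = (some b, PySem.Str.len b) ∧
      PySem.Str.startswith m b = true ∧ b ∈ L ∧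
      ∀ q ∈ L, PySem.Str.startswith m q = true → PySem.Str.len q ≤ PySem.Str.len b) := by
  induction L with
  | nil => intro st; left; exact ⟨rfl, by simp⟩
  | cons x xs ih =>
    intro st
    by_cases hxm : PySem.Str.startswith m x = true
    · by_cases hlt : st.2 < PySem.Str.len x
      · have hstep : stepB m st x = (some x, PySem.Str.len x) := by
          unfold stepB; rw [hxm, decide_eq_true hlt]; rfl
        rcases ih (some x, PySem.Str.len x) with ⟨h1, h2⟩ | ⟨b, hb1, hb2, hb3, hb4⟩
        · right
          refine ⟨x, ?_, hxm, by simp, ?_⟩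
          · rw [List.foldl_cons, hstep, h1]
          · intro q hq hqm
            rcases List.mem_cons.mp hq with h | h
            · exact le_of_eq (by rw [h])
            · exact h2 q h hqm
        · right
          refine ⟨b, by rw [List.foldl_cons, hstep, hb1], hb2, by simp [hb3], ?_⟩
          intro q hq hqm
          rcases List.mem_cons.mp hq with h | h
          · subst h
            have hmono := foldB_mono m xs (some q, PySem.Str.len q)
            rw [hb1] at hmono
            exact hmono
          · exact hb4 q h hqm
      · have hstep : stepB m st x = st := by
          unfold stepB; rw [decide_eq_false hlt, Bool.and_false]; rfl
        rcases ih st with ⟨h1, h2⟩ | ⟨b, hb1, hb2, hb3, hb4⟩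
        · left
          refine ⟨by rw [List.foldl_cons, hstep, h1], ?_⟩
          intro p hp hpm
          rcases List.mem_cons.mp hp with h | h
          · subst h; omega
          · exact h2 p h hpm
        · right
          refine ⟨b, by rw [List.foldl_cons, hstep, hb1], hb2, by simp [hb3], ?_⟩
          intro q hq hqm
          rcases List.mem_cons.mp hq with h | h
          · subst h
            have hmono := foldB_mono m xs st
            rw [hb1] at hmono
            omega
          · exact hb4 q h hqm
    · have hstep : stepB m st x = st := by
        unfold stepB; rw [Bool.eq_false_iff.mpr hxm, Bool.false_and]; rfl
      rcases ih st with ⟨h1, h2⟩ | ⟨b, hb1, hb2, hb3, hb4⟩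
      · left
        refine ⟨by rw [List.foldl_cons, hstep, h1], ?_⟩
        intro p hp hpm
        rcases List.mem_cons.mp hp with h | h
        · exact absurd (h ▸ hpm) hxm
        · exact h2 p h hpm
      · right
        refine ⟨b, by rw [List.foldl_cons, hstep, hb1], hb2, by simp [hb3], ?_⟩
        intro q hq hqm
        rcases List.mem_cons.mp hq with h | h
        · exact absurd (h ▸ hqm) hxm
        · exact hb4 q h hqm

-- the core equivalence on one model list
theorem scan_eq_fold (m : String) (models : List String) :
    scanA m (PySem.List.sorted models (fun s => PySem.Str.len s) true) =
    (match (models.foldl (stepB m) (none, -1)).1 with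
     | none => (m, "Base")
     | some best =>
       (best, if PySem.Str.strip (PySem.Str.slice m (some (models.foldl (stepB m) (none, -1)).2) none) = ""
              then "Base"
              else PySem.Str.strip (PySem.Str.slice m (some (models.foldl (stepB m) (none, -1)).2) none))) := by
  rcases foldB_spec m models (none, -1) with ⟨h1, h2⟩ | ⟨b, hb1, hb2, hb3, hb4⟩
  · -- nothing matches
    rw [h1]
    have hnone : ∀ p ∈ models, PySem.Str.startswith m p = false := by
      intro p hp
      rcases Bool.eq_false_or_eq_true (PySem.Str.startswith m p) with ht | hf
      · exfalso
        have := h2 p hp ht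
        rw [PySem.Str.len_eq] at this
        omega
      · exact hf
    refine scanA_no_match m _ (fun p hp => hnone p ?_)
    rwa [PySem.List.mem_sorted] at hp
  · rw [hb1]
    have hsp := PySem.List.sorted_pairwise_rev models (fun s => PySem.Str.len s)
    have hbmem : b ∈ PySem.List.sorted models (fun s => PySem.Str.len s) true := by
      rw [PySem.List.mem_sorted]; exact hb3
    rcases scanA_first_match m _ hsp b hbmem hb2 with ⟨q, hq1, hq2, hq3, hq4⟩
    have hqmem : q ∈ models := by
      rw [PySem.List.mem_sorted] at hq1; exact hq1
    have hle1 : PySem.Str.len q ≤ PySem.Str.len b := hb4 q hqmem hq2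
    have hle2 : PySem.Str.len b ≤ PySem.Str.len q := hq3 b hbmem hb2
    have hqb : q = b := prefix_unique hq2 hb2 (le_antisymm hle1 hle2)
    subst hqb
    exact hq4

-- ===== VERDICT (by name: the statement is the Claim_ definition above) =====
theorem extract_base_model_spec : Claim_equal_extract_base_model := by
  intro m make _
  show extract_base_model m make = extract_base_model_alt m make
  unfold extract_base_model extract_base_model_alt
  cases h : PySem.Dict.get? baseModels make with
  | none => rfl
  | some models => exact scan_eq_fold m models
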